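-- pv_equiv track=rewrite | github.com/JamieKalloe/ISCRIPT | Week 4/Opdracht17.py | samen
-- ===== SOURCE A (Python) =====
-- def samen(prijzen):
--     prijzen = sorted(prijzen, key=float)
--     gratisProducten = int(len(prijzen) / 4)
--     total = 0
--     for prijs in prijzen:
--         total += prijs
--
--     for gratisProduct in range(0, gratisProducten):
--         total -= prijzen[gratisProduct]
--
--     return total
-- ===== SOURCE B (Python) =====
-- def samen(prijzen):
--     # total price minus the cheapest quarter, via three-way quickselect
--     # (no full sort): sum of the k smallest elements, k = len // 4.
--     k = len(prijzen) // 4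
--     return sum(prijzen) - _sum_k_smallest(prijzen, k)
--
--
-- def _sum_k_smallest(xs, k):
--     # sum of the k smallest elements of xs (requires 0 <= k <= len(xs))
--     if k == 0:
--         return 0
--     pivot = xs[len(xs) // 2]
--     lt = [x for x in xs if x < pivot]
--     if k <= len(lt):
--         return _sum_k_smallest(lt, k)
--     eq = [x for x in xs if x == pivot]
--     if k <= len(lt) + len(eq):
--         return sum(lt) + pivot * (k - len(lt))
--     gt = [x for x in xs if x > pivot]
--     return sum(lt) + pivot * len(eq) + _sum_k_smallest(gt, k - len(lt) - len(eq))
-- ===== Notes on version B (the rewrite author's own statement) =====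
-- stated objective: alternative
-- what changed: B replaces sort-then-subtract-prefix by a three-way quickselect recursion that sums the k=len//4 smallest elements without sorting, then subtracts that from the total.
import Mathlib
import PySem

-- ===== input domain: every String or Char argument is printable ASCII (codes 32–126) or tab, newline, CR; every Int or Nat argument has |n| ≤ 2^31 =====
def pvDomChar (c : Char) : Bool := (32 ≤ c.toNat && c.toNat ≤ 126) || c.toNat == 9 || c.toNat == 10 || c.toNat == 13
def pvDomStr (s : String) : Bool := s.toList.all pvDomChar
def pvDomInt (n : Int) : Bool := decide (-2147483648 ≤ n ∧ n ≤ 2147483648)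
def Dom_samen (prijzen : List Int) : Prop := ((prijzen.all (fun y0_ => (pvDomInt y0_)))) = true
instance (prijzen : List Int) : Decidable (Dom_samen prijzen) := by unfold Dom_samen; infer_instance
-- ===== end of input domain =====

-- B replaces A's full sort + prefix subtraction by a three-way quickselect recursion that
-- sums the len//4 smallest elements directly (no sort); equal return value on every input.


-- ===== PORT A =====
-- key=float is order-preserving and exact on the Int domain (|n| ≤ 2^31 < 2^53),
-- so `sorted(prijzen, key=float)` is ported as sorting with the identity key;
-- int(len(prijzen) / 4) = len / 4 in Nat (len ≥ 0, exact in float for list lengths).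
def samen (prijzen : List Int) : Int :=
  let s := PySem.List.sorted prijzen (fun x => x) false
  let gratisProducten : Nat := prijzen.length / 4
  let total := s.foldl (fun acc prijs => acc + prijs) 0
  (PySem.List.pyRange 0 (gratisProducten : Int) 1).foldl
    (fun acc i => acc - PySem.List.pyGetD s i 0) total

-- ===== PORT B =====
-- termination helpers for the quickselect recursion (cited in decreasing_by)
theorem pvFilterLenLt (p : Int → Bool) (xs : List Int) (a : Int)
    (ha : a ∈ xs) (hpa : p a = false) : (xs.filter p).length < xs.length :=
  (List.length_filter_lt_length_iff_exists (l := xs) (p := p)).mpr ⟨a, ha, by simp [hpa]⟩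

theorem pvPivotLt (y : Int) (ys : List Int) (p : Int → Bool)
    (hp : p ((y :: ys).getD ((y :: ys).length / 2) 0) = false) :
    ((y :: ys).filter p).length < (y :: ys).length := by
  refine pvFilterLenLt p (y :: ys) ((y :: ys).getD ((y :: ys).length / 2) 0) ?_ hp
  rw [List.getD_eq_getElem _ 0 (by simp; omega)]
  exact List.getElem_mem _

-- port of B's helper _sum_k_smallest (sum of the k smallest elements, requires k ≤ len(xs);
-- the `[] => 0` arm and the `getD … 0` default are totalization guards Python never reaches)
def sumKSmallest (xs : List Int) (k : Nat) : Int :=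
  if k = 0 then 0
  else
    match xs with
    | [] => 0
    | y :: ys =>
      let xs' := y :: ys
      let pivot := xs'.getD (xs'.length / 2) 0
      let lt := xs'.filter (fun x => x < pivot)
      if k ≤ lt.length then sumKSmallest lt k
      else
        let eq := xs'.filter (fun x => x == pivot)
        if k ≤ lt.length + eq.length then
          lt.sum + pivot * ((k : Int) - (lt.length : Int))
        else
          let gt := xs'.filter (fun x => pivot < x)
          lt.sum + pivot * (eq.length : Int) + sumKSmallest gt (k - lt.length - eq.length)
termination_by xs.length
decreasing_by
  · exact pvPivotLt _ _ _ (by simp)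
  · exact pvPivotLt _ _ _ (by simp)

def samen_alt (prijzen : List Int) : Int :=
  let k := prijzen.length / 4
  prijzen.sum - sumKSmallest prijzen k

-- ===== PRECONDITION & SPEC =====
def Spec_samen (prijzen : List Int) (out : Int) : Prop := out = samen_alt prijzen
instance (prijzen : List Int) (out : Int) : Decidable (Spec_samen prijzen out) := by unfold Spec_samen; infer_instance

-- ===== CLAIM (what is proved, stated in full; the proofs are below) =====
def Claim_equal_samen : Prop := ∀ (prijzen : List Int), Dom_samen prijzen → Spec_samen prijzen (samen prijzen)

-- ===== LEMMAS AND PROOFS =====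
theorem pvBoolEq1 (pivot x : Int) : ((x == pivot) && !decide (x < pivot)) = (x == pivot) := by
  by_cases h : x = pivot <;> simp [h]

theorem pvBoolEq2 (pivot x : Int) : ((!(x == pivot)) && !decide (x < pivot)) = decide (pivot < x) := by
  rcases lt_trichotomy x pivot with h | h | h
  · simp [h, not_lt_of_gt h]
  · simp [h]
  · simp [(ne_of_gt h), le_of_lt h, h]

theorem pvPartPerm (xs : List Int) (pivot : Int) :
    (xs.filter (fun x => decide (x < pivot))
      ++ (xs.filter (fun x => x == pivot) ++ xs.filter (fun x => decide (pivot < x)))).Perm xs := by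
  have h1 := List.filter_append_perm (fun x => decide (x < pivot)) xs
  have h2 := List.filter_append_perm (fun x => x == pivot)
      (xs.filter (fun x => !decide (x < pivot)))
  have e1 : (xs.filter (fun x => !decide (x < pivot))).filter (fun x => x == pivot)
      = xs.filter (fun x => x == pivot) := by
    rw [List.filter_filter]
    exact List.filter_congr (fun x _ => pvBoolEq1 pivot x)
  have e2 : (xs.filter (fun x => !decide (x < pivot))).filter (fun x => !(x == pivot))
      = xs.filter (fun x => decide (pivot < x)) := by
    rw [List.filter_filter]
    exact List.filter_congr (fun x _ => pvBoolEq2 pivot x)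
  have h2' : (xs.filter (fun x => x == pivot) ++ xs.filter (fun x => decide (pivot < x))).Perm
      (xs.filter (fun x => !decide (x < pivot))) := by
    rw [← e1, ← e2]; exact h2
  exact ((List.Perm.refl _).append h2').trans h1

theorem pvSortSplit (xs : List Int) (pivot : Int) :
    PySem.List.sorted xs (fun x => x) false
      = PySem.List.sorted (xs.filter (fun x => decide (x < pivot))) (fun x => x) false
        ++ xs.filter (fun x => x == pivot)
        ++ PySem.List.sorted (xs.filter (fun x => decide (pivot < x))) (fun x => x) false := by
  set lt := xs.filter (fun x => decide (x < pivot)) with hlt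
  set eq := xs.filter (fun x => x == pivot) with heq
  set gt := xs.filter (fun x => decide (pivot < x)) with hgt
  have pl := PySem.List.sorted_perm lt (fun x => x) false
  have pg := PySem.List.sorted_perm gt (fun x => x) false
  apply PySem.List.sorted_id_eq_of_perm_of_pairwise
  · have step : (PySem.List.sorted lt (fun x => x) false ++ eq
        ++ PySem.List.sorted gt (fun x => x) false).Perm (lt ++ (eq ++ gt)) := by
      rw [List.append_assoc]
      exact pl.append ((List.Perm.refl eq).append pg)
    exact step.trans (pvPartPerm xs pivot)
  · have mlt : ∀ a ∈ PySem.List.sorted lt (fun x => x) false, a < pivot := by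
      intro a ha
      have := (PySem.List.mem_sorted lt _ _ a).mp ha
      have := List.of_mem_filter this
      simpa using this
    have meq : ∀ a ∈ eq, a = pivot := by
      intro a ha
      have := List.of_mem_filter ha
      simpa using this
    have mgt : ∀ a ∈ PySem.List.sorted gt (fun x => x) false, pivot < a := by
      intro a ha
      have := (PySem.List.mem_sorted gt _ _ a).mp ha
      have := List.of_mem_filter this
      simpa using this
    rw [List.pairwise_append, List.pairwise_append]
    refine ⟨⟨?_, ?_, ?_⟩, ?_, ?_⟩
    · have := PySem.List.sorted_pairwise lt (fun x => x)
      simpa using this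
    · exact List.pairwise_of_forall_mem_list (fun a ha b hb => by rw [meq a ha, meq b hb])
    · intro a ha b hb
      rw [meq b hb]
      exact le_of_lt (mlt a ha)
    · have := PySem.List.sorted_pairwise gt (fun x => x)
      simpa using this
    · intro a ha b hb
      rcases List.mem_append.mp ha with h | h
      · exact le_of_lt (lt_trans (mlt a h) (mgt b hb))
      · rw [meq a h]; exact le_of_lt (mgt b hb)


-- A's subtraction loop removes the sum of the first g elements of the sorted list
theorem pvSubLoop (s : List Int) : ∀ (g : Nat), g ≤ s.length → ∀ (t : Int),
    (PySem.List.pyRange 0 (g : Int) 1).foldl (fun acc i => acc - PySem.List.pyGetD s i 0) t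
      = t - (s.take g).sum := by
  intro g
  induction g with
  | zero => intro _ t; simp [PySem.List.pyRange_one_eq_nil]
  | succ n ih =>
    intro hg t
    have hlt : n < s.length := hg
    have hcast : ((n + 1 : Nat) : Int) = (n : Int) + 1 := by push_cast; ring
    rw [hcast, PySem.List.pyRange_one_succ_right (by positivity), List.foldl_append,
        ih (Nat.le_of_succ_le hg) t]
    simp only [List.foldl_cons, List.foldl_nil, PySem.List.pyGetD_natCast]
    rw [List.getD_eq_getElem _ 0 hlt, List.take_add_one, List.sum_append,
        List.getElem?_eq_getElem hlt]
    simp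
    ring

-- A computes (total of sorted list) minus (sum of its first len/4 elements)
theorem pvSamen_eq_sorted (prijzen : List Int) :
    samen prijzen =
      (PySem.List.sorted prijzen (fun x => x) false).sum
        - ((PySem.List.sorted prijzen (fun x => x) false).take (prijzen.length / 4)).sum := by
  have hlen : (PySem.List.sorted prijzen (fun x => x) false).length = prijzen.length :=
    (PySem.List.sorted_perm prijzen (fun x => x) false).length_eq
  show (PySem.List.pyRange 0 ((prijzen.length / 4 : Nat) : Int) 1).foldl
      (fun acc i => acc - PySem.List.pyGetD (PySem.List.sorted prijzen (fun x => x) false) i 0)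
      ((PySem.List.sorted prijzen (fun x => x) false).foldl (fun acc prijs => acc + prijs) 0) = _
  rw [pvSubLoop _ _ (by rw [hlen]; exact Nat.div_le_self _ _)]
  rw [PySem.List.foldl_add (g := fun x => x)]
  simp

theorem pvSumConst (l : List Int) (c : Int) (h : ∀ a ∈ l, a = c) :
    l.sum = (l.length : Int) * c := by
  induction l with
  | nil => simp
  | cons x t ih =>
    have hx := h x (by simp)
    have ht := ih (fun a ha => h a (List.mem_cons_of_mem _ ha))
    simp [hx, ht]; ring

theorem pvSumK_eq (xs : List Int) (k : Nat) :
    k ≤ xs.length → sumKSmallest xs k = ((PySem.List.sorted xs (fun x => x) false).take k).sum := by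
  fun_induction sumKSmallest xs k
  case case1 => simp
  case case2 => intro h; simp at h; omega
  case case3 k hk0 y ys xs' pivot lt hkle ih =>
    intro hle
    have hsplit := pvSortSplit (y :: ys) ((y :: ys).getD ((y :: ys).length / 2) 0)
    have hslt : (PySem.List.sorted ((y :: ys).filter
        (fun x => decide (x < (y :: ys).getD ((y :: ys).length / 2) 0))) (fun x => x) false).length
        = ((y :: ys).filter (fun x => decide (x < (y :: ys).getD ((y :: ys).length / 2) 0))).length :=
      (PySem.List.sorted_perm _ (fun x => x) false).length_eq
    rw [hsplit, List.append_assoc, List.take_append_of_le_length (by rw [hslt]; exact hkle)]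
    exact ih hkle
  case case4 k hk0 y ys xs' pivot lt hnlt eq hkle =>
    intro hle
    have hsplit : PySem.List.sorted (y :: ys) (fun x => x) false
        = PySem.List.sorted lt (fun x => x) false ++ eq
          ++ PySem.List.sorted ((y :: ys).filter (fun x => decide (pivot < x))) (fun x => x) false :=
      pvSortSplit (y :: ys) pivot
    have hpl : (PySem.List.sorted lt (fun x => x) false).Perm lt :=
      PySem.List.sorted_perm lt (fun x => x) false
    have hslt := hpl.length_eq
    have meq : ∀ a ∈ eq, a = pivot := by
      intro a ha
      have := List.of_mem_filter ha
      simpa using this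
    rw [hsplit, List.append_assoc, List.take_append, List.take_append, hslt,
        List.take_of_length_le (show (PySem.List.sorted lt (fun x => x) false).length ≤ k by rw [hslt]; omega),
        Nat.sub_eq_zero_of_le (by omega : k - lt.length ≤ eq.length)]
    simp only [List.take_zero, List.append_nil, List.sum_append, hpl.sum_eq]
    rw [pvSumConst (List.take (k - lt.length) eq) pivot
        (fun a ha => meq a (List.mem_of_mem_take ha)),
        List.length_take, Nat.min_eq_left (by omega : k - lt.length ≤ eq.length)]
    have hc : ((k - lt.length : Nat) : Int) = (k : Int) - (lt.length : Int) := by omega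
    rw [hc]; ring
  case case5 k hk0 y ys xs' pivot lt hnlt eq hnle gt ih =>
    intro hle
    have hsplit : PySem.List.sorted (y :: ys) (fun x => x) false
        = PySem.List.sorted lt (fun x => x) false ++ eq
          ++ PySem.List.sorted gt (fun x => x) false :=
      pvSortSplit (y :: ys) pivot
    have hpl : (PySem.List.sorted lt (fun x => x) false).Perm lt :=
      PySem.List.sorted_perm lt (fun x => x) false
    have hslt := hpl.length_eq
    have hpart : (lt ++ (eq ++ gt)).Perm (y :: ys) := pvPartPerm (y :: ys) pivot
    have hlen := hpart.length_eq
    simp only [List.length_append, List.length_cons] at hlen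
    have meq : ∀ a ∈ eq, a = pivot := by
      intro a ha
      have := List.of_mem_filter ha
      simpa using this
    have hgtk : k - lt.length - eq.length ≤ gt.length := by
      simp only [List.length_cons] at hle; omega
    rw [hsplit, List.append_assoc, List.take_append, List.take_append, hslt,
        List.take_of_length_le (show (PySem.List.sorted lt (fun x => x) false).length ≤ k by rw [hslt]; omega),
        List.take_of_length_le (show eq.length ≤ k - lt.length by omega)]
    simp only [List.sum_append, hpl.sum_eq]
    rw [← ih hgtk, pvSumConst eq pivot meq]
    ring

-- ===== VERDICT (by name: the statement is the Claim_ definition above) =====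
theorem samen_spec : Claim_equal_samen := by
  intro prijzen _
  show samen prijzen = samen_alt prijzen
  show samen prijzen = prijzen.sum - sumKSmallest prijzen (prijzen.length / 4)
  rw [pvSamen_eq_sorted, pvSumK_eq prijzen _ (Nat.div_le_self _ _),
      (PySem.List.sorted_perm prijzen (fun x => x) false).sum_eq]
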